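-- pv_equiv track=rewrite | github.com/Sumanshu-Nankana/Python-Practice-Codes | Leetcode/1426 # Counting Elements.py | countingElemets
-- ===== SOURCE A (Python) =====
-- from collections import Counter
-- from typing import List
--
-- def countingElemets(arr: List) -> int:
--     dic = Counter(arr)
--     arr = set(arr)
--
--     count = 0
--     for ele in arr:
--         if ele+1 in dic:
--             count = count  + dic[ele]
--
--     return count
-- ===== SOURCE B (Python) =====
-- def countingElemets(arr):
--     s = set(arr)
--     return sum(1 for x in arr if x + 1 in s)
-- ===== Notes on version B (the rewrite author's own statement) =====
-- stated objective: simpler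
-- what changed: Drops the Counter entirely: instead of summing stored occurrence counts over the unique values, B builds one membership set and counts elements of the original list (duplicates included) whose successor is in it.
import Mathlib
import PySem

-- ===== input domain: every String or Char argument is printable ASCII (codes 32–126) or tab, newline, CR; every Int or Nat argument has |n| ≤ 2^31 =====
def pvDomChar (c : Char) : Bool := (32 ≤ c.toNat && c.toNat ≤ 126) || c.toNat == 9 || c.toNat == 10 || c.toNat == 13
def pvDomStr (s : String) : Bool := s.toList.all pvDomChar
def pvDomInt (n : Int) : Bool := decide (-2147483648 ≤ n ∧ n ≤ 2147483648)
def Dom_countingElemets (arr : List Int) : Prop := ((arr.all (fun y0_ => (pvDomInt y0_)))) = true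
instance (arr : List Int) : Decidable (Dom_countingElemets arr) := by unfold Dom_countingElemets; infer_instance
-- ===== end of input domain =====

-- B drops the Counter: one membership set, then count elements of the full list whose successor is present (same O(n) cost, plainer code).


-- ===== PORT A =====
def countingElemets (arr : List Int) : Int :=
  let dic := PySem.Dict.counter arr
  let arrSet := PySem.Set.ofList arr
  arrSet.foldl (fun count ele =>
    if dic.contains (ele + 1) then count + dic.getD ele 0 else count) 0

-- ===== PORT B =====
def countingElemets_alt (arr : List Int) : Int :=
  let s := PySem.Set.ofList arr
  arr.foldl (fun acc x => if PySem.Set.contains s (x + 1) then acc + 1 else acc) 0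

-- ===== PRECONDITION & SPEC =====
def Spec_countingElemets (arr : List Int) (out : Int) : Prop := out = countingElemets_alt arr
instance (arr : List Int) (out : Int) : Decidable (Spec_countingElemets arr out) := by unfold Spec_countingElemets; infer_instance

-- ===== CLAIM (what is proved, stated in full; the proofs are below) =====
def Claim_equal_countingElemets : Prop := ∀ (arr : List Int), Dom_countingElemets arr → Spec_countingElemets arr (countingElemets arr)

-- ===== LEMMAS AND PROOFS =====

-- sum of a pointwise sum splits
theorem pvSumMapSplit (f g : Int → Int) (l : List Int) :
    (l.map (fun x => f x + g x)).sum = (l.map f).sum + (l.map g).sum := by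
  induction l with
  | nil => simp
  | cons a t ih => simp only [List.map_cons, List.sum_cons, ih]; ring

-- over a Nodup list, an indicator concentrated at `a` sums to at most one hit
theorem pvSumSingle (p : Int → Prop) [DecidablePred p] (a : Int) (c : Int) :
    ∀ (s : List Int), s.Nodup →
      (s.map (fun e => if p e ∧ e = a then c else 0)).sum
        = if p a ∧ a ∈ s then c else 0 := by
  intro s
  induction s with
  | nil => simp
  | cons h t ih =>
    intro hnd
    rcases List.nodup_cons.mp hnd with ⟨hna, hnt⟩
    simp only [List.map_cons, List.sum_cons, ih hnt]
    by_cases hha : h = a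
    · subst hha
      by_cases hp : p h <;> simp [hp, hna]
    · by_cases hp : p a <;> by_cases hm : a ∈ t <;>
        simp [hha, hp, hm, Ne.symm hha]

-- the key bridge: weighted sum over a Nodup value list = unit count over the full list
theorem pvKey (p : Int → Prop) [DecidablePred p] (s : List Int) (hs : s.Nodup) :
    ∀ (arr : List Int),
      (s.map (fun e => if p e then ((List.count e arr : Int)) else 0)).sum
        = (arr.map (fun x => if x ∈ s ∧ p x then (1 : Int) else 0)).sum := by
  intro arr
  induction arr with
  | nil => simp
  | cons a t ih =>
    have hfun : (fun e => if p e then ((List.count e (a :: t) : Int)) else 0)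
        = (fun e => (if p e then ((List.count e t : Int)) else 0)
            + (if p e ∧ e = a then 1 else 0)) := by
      funext e
      by_cases hp : p e
      · by_cases hea : e = a
        · subst hea
          simp only [List.count_cons, hp, if_true, and_true, BEq.rfl]
          push_cast
          ring
        · simp [hp, hea, Ne.symm hea]
      · simp [hp]
    rw [hfun, pvSumMapSplit, ih, pvSumSingle p a 1 s hs]
    simp only [List.map_cons, List.sum_cons]
    by_cases hm : a ∈ s <;> by_cases hp : p a <;> simp [hm, hp] <;> ring

-- ===== VERDICT (by name: the statement is the Claim_ definition above) =====
theorem countingElemets_spec : Claim_equal_countingElemets := by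
  intro arr _
  show countingElemets arr = countingElemets_alt arr
  unfold countingElemets countingElemets_alt
  simp only []
  -- A's loop: rewrite Counter lookups into plain count/membership, then sum it
  rw [PySem.List.foldl_congr_mem (PySem.Set.ofList arr) _
      (fun c e => c + (if (e + 1) ∈ arr then ((List.count e arr : Int)) else 0)) 0
      (by
        intro acc x hx
        simp only [PySem.Dict.contains_counter, PySem.Dict.getD_counter, List.contains_iff_mem]
        split_ifs <;> simp)]
  rw [PySem.List.foldl_add]
  -- B's loop: rewrite set membership, then sum it
  rw [PySem.List.foldl_congr_mem arr _
      (fun acc x => acc + (if x ∈ PySem.Set.ofList arr ∧ (x + 1) ∈ arr then (1 : Int) else 0)) 0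
      (by
        intro acc x hx
        have hxs : x ∈ PySem.Set.ofList arr := (PySem.Set.mem_ofList arr x).mpr hx
        simp only [PySem.Set.contains, List.contains_iff_mem, PySem.Set.mem_ofList, hxs,
          true_and]
        split_ifs <;> simp)]
  rw [PySem.List.foldl_add]
  simpa using pvKey (fun e => (e + 1) ∈ arr) (PySem.Set.ofList arr)
    (PySem.Set.nodup_ofList arr) arr
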